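-- pv_equiv track=rewrite | github.com/Lap-Platform/LAP | lap/core/compilers/protobuf.py | _find_line_comment
-- ===== SOURCE A (Python) =====
-- def _find_line_comment(line: str) -> int:
--     """Find the start index of a // comment, respecting string literals. Returns -1 if none."""
--     in_string = False
--     quote_char = None
--     i = 0
--     while i < len(line):
--         c = line[i]
--         if in_string:
--             if c == '\\':
--                 i += 2
--                 continue
--             if c == quote_char:
--                 in_string = False
--         else:
--             if c == '"' or c == "'":
--                 in_string = True
--                 quote_char = c
--             elif c == '/' and i + 1 < len(line) and line[i + 1] == '/':
--                 return i
--         i += 1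
--     return -1
-- ===== SOURCE B (Python) =====
-- import re
--
-- # Tokenizer: a double- or single-quoted string literal (with \-escapes, optional
-- # closing quote so an unterminated string swallows the rest), or the token '//'.
-- _TOKEN = re.compile(r'"(?:\\.|[^"\\])*"?|\'(?:\\.|[^\'\\])*\'?|//', re.S)
--
--
-- def _find_line_comment(line: str) -> int:
--     """Find the start index of a // comment, respecting string literals. Returns -1 if none."""
--     for m in _TOKEN.finditer(line):
--         if m.group() == '//':
--             return m.start()
--     return -1
-- ===== Notes on version B (the rewrite author's own statement) =====
-- stated objective: idiomatic
-- what changed: Replaces A's manual in_string/quote_char state machine with a compiled regex tokenizer (string literal with escapes and optional closing quote, or the comment token) iterated with re.finditer, returning the start of the first comment token.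
import Mathlib
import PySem

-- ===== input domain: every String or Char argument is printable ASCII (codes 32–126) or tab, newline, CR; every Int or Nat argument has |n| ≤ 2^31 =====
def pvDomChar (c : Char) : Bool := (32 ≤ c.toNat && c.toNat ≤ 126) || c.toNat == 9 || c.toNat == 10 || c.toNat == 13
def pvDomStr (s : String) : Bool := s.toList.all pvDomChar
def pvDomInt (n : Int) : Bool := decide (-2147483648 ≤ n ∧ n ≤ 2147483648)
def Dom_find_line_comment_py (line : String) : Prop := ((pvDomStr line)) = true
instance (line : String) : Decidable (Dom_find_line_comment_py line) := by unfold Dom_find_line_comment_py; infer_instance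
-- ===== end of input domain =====

-- B replaces A's manual in_string/quote_char state machine by a regex tokenizer
-- (string literal with escapes and an optional closing quote, or the token '//')
-- iterated left to right; return values are provably identical.

-- ===== PORT A =====
-- literal port of A's while-loop: index i, state (in_string, quote_char); quote_char None → Option Char
def findA (cs : List Char) : Nat → Nat → Bool → Option Char → Int
  | 0, _, _, _ => -1
  | fuel + 1, i, inStr, q =>
    if i < cs.length then
      let c := cs[i]!
      if inStr then
        if c = '\\' then findA cs fuel (i + 2) inStr q
        else if some c = q then findA cs fuel (i + 1) false q
        else findA cs fuel (i + 1) inStr q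
      else
        if c = '"' ∨ c = '\'' then findA cs fuel (i + 1) true (some c)
        else if c = '/' ∧ i + 1 < cs.length ∧ cs[i + 1]! = '/' then (i : Int)
        else findA cs fuel (i + 1) inStr q
    else -1

def find_line_comment_py (line : String) : Int :=
  findA line.toList (line.toList.length + 1) 0 false none

-- ===== PORT B =====
-- hand port of the regex engine on B's pattern (PySem has no regex; exact on every input):
-- greedy star (?:\\.|[^q\\])* starting after the opening quote q — `\\.` consumes a
-- backslash plus ANY next char (re.S), `[^q\\]` any char but q/backslash; stops where
-- neither alternative matches (closing quote, lone trailing backslash, or end of input)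
def tokenBody (cs : List Char) : Nat → Nat → Char → Nat
  | 0, j, _ => j
  | fuel + 1, j, q =>
    if j < cs.length then
      if cs[j]! = '\\' then
        if j + 1 < cs.length then tokenBody cs fuel (j + 2) q else j
      else if cs[j]! = q then j
      else tokenBody cs fuel (j + 1) q
    else j

-- the optional closing quote `q?` after the star: the full string token ends here
def tokenEnd (cs : List Char) (j : Nat) (q : Char) : Nat :=
  let e := tokenBody cs (cs.length + 1) j q
  if e < cs.length then (if cs[e]! = q then e + 1 else e) else e

-- finditer: try the alternation at p ('"'-string | '\''-string | '//'); on a string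
-- token resume after it, on '//' report m.start(); otherwise advance one position
def findB (cs : List Char) : Nat → Nat → Int
  | 0, _ => -1
  | fuel + 1, p =>
    if p < cs.length then
      let c := cs[p]!
      if c = '"' ∨ c = '\'' then findB cs fuel (tokenEnd cs (p + 1) c)
      else if c = '/' ∧ p + 1 < cs.length ∧ cs[p + 1]! = '/' then (p : Int)
      else findB cs fuel (p + 1)
    else -1

def find_line_comment_py_alt (line : String) : Int :=
  findB line.toList (line.toList.length + 1) 0

-- ===== PRECONDITION & SPEC =====
def Spec_find_line_comment_py (line : String) (out : Int) : Prop := out = find_line_comment_py_alt line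
instance (line : String) (out : Int) : Decidable (Spec_find_line_comment_py line out) := by unfold Spec_find_line_comment_py; infer_instance

-- ===== CLAIM (what is proved, stated in full; the proofs are below) =====
def Claim_equal_find_line_comment_py : Prop := ∀ (line : String), Dom_find_line_comment_py line → Spec_find_line_comment_py line (find_line_comment_py line)

-- ===== LEMMAS AND PROOFS =====

theorem tokenBody_fuel (cs : List Char) (k : Nat) :
    ∀ (j : Nat) (q : Char) (f1 f2 : Nat), cs.length - j ≤ k →
      cs.length - j < f1 → cs.length - j < f2 →
      tokenBody cs f1 j q = tokenBody cs f2 j q := by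
  induction k with
  | zero =>
    intro j q f1 f2 hk h1 h2
    obtain ⟨f1', rfl⟩ : ∃ m, f1 = m + 1 := ⟨f1 - 1, by omega⟩
    obtain ⟨f2', rfl⟩ : ∃ m, f2 = m + 1 := ⟨f2 - 1, by omega⟩
    have hj : ¬ j < cs.length := by omega
    simp only [tokenBody, if_neg hj]
  | succ k ih =>
    intro j q f1 f2 hk h1 h2
    obtain ⟨f1', rfl⟩ : ∃ m, f1 = m + 1 := ⟨f1 - 1, by omega⟩
    obtain ⟨f2', rfl⟩ : ∃ m, f2 = m + 1 := ⟨f2 - 1, by omega⟩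
    by_cases hj : j < cs.length
    · simp only [tokenBody, if_pos hj]
      split_ifs with hb hb2 hq
      · exact ih (j + 2) q f1' f2' (by omega) (by omega) (by omega)
      · rfl
      · rfl
      · exact ih (j + 1) q f1' f2' (by omega) (by omega) (by omega)
    · simp only [tokenBody, if_neg hj]

-- tokenEnd stepping lemmas
theorem tokenEnd_out (cs : List Char) (j : Nat) (q : Char) (hj : ¬ j < cs.length) :
    tokenEnd cs j q = j := by
  have hb : tokenBody cs (cs.length + 1) j q = j := by
    obtain ⟨m, hm⟩ : ∃ m, cs.length + 1 = m + 1 := ⟨cs.length, rfl⟩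
    rw [hm]; simp only [tokenBody, if_neg hj]
  simp only [tokenEnd, hb, if_neg hj]

theorem tokenEnd_backslash (cs : List Char) (j : Nat) (q : Char)
    (hj : j < cs.length) (hb : cs[j]! = '\\') (h2 : j + 1 < cs.length) :
    tokenEnd cs j q = tokenEnd cs (j + 2) q := by
  have : tokenBody cs (cs.length + 1) j q = tokenBody cs (cs.length + 1) (j + 2) q := by
    have step : tokenBody cs (cs.length + 1) j q = tokenBody cs cs.length (j + 2) q := by
      simp only [tokenBody, if_pos hj, if_pos hb, if_pos h2]
    rw [step]
    exact tokenBody_fuel cs (cs.length - (j + 2)) (j + 2) q cs.length (cs.length + 1)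
      (le_refl _) (by omega) (by omega)
  simp only [tokenEnd, this]

theorem tokenEnd_backslash_last (cs : List Char) (j : Nat) (q : Char)
    (hj : j < cs.length) (hb : cs[j]! = '\\') (h2 : ¬ j + 1 < cs.length) (hq : q ≠ '\\') :
    tokenEnd cs j q = j := by
  have hbody : tokenBody cs (cs.length + 1) j q = j := by
    obtain ⟨m, hm⟩ : ∃ m, cs.length + 1 = m + 1 := ⟨cs.length, rfl⟩
    rw [hm]; simp only [tokenBody, if_pos hj, if_pos hb, if_neg h2]
  have hne : ¬ cs[j]! = q := by rw [hb]; exact fun h => hq h.symm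
  simp only [tokenEnd, hbody, if_pos hj, if_neg hne]

theorem tokenEnd_close (cs : List Char) (j : Nat) (q : Char)
    (hj : j < cs.length) (he : cs[j]! = q) (hq : q ≠ '\\') :
    tokenEnd cs j q = j + 1 := by
  have hb : ¬ cs[j]! = '\\' := by rw [he]; exact hq
  have hbody : tokenBody cs (cs.length + 1) j q = j := by
    obtain ⟨m, hm⟩ : ∃ m, cs.length + 1 = m + 1 := ⟨cs.length, rfl⟩
    rw [hm]; simp only [tokenBody, if_pos hj, if_neg hb, if_pos he]
  simp only [tokenEnd, hbody, if_pos hj, if_pos he]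

theorem tokenEnd_step (cs : List Char) (j : Nat) (q : Char)
    (hj : j < cs.length) (hb : ¬ cs[j]! = '\\') (he : ¬ cs[j]! = q) :
    tokenEnd cs j q = tokenEnd cs (j + 1) q := by
  have : tokenBody cs (cs.length + 1) j q = tokenBody cs (cs.length + 1) (j + 1) q := by
    have step : tokenBody cs (cs.length + 1) j q = tokenBody cs cs.length (j + 1) q := by
      simp only [tokenBody, if_pos hj, if_neg hb, if_neg he]
    rw [step]
    exact tokenBody_fuel cs (cs.length - (j + 1)) (j + 1) q cs.length (cs.length + 1)
      (le_refl _) (by omega) (by omega)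
  simp only [tokenEnd, this]

-- combined invariant: outside a string A's scan equals B's finditer at the same index;
-- inside a string opened with quote q, A's scan from j equals B's finditer resumed at
-- the end of the regex string token whose remaining body starts at j
theorem findA_eq_findB (cs : List Char) (k : Nat) :
    ∀ i fa fb, cs.length - i ≤ k → cs.length - i < fa → cs.length - i < fb →
      (∀ q, findA cs fa i false q = findB cs fb i) ∧
      (∀ q : Char, q = '"' ∨ q = '\'' →
        findA cs fa i true (some q) = findB cs fb (tokenEnd cs i q)) := by
  induction k with
  | zero =>
    intro i fa fb hk hfa hfb
    obtain ⟨fa', rfl⟩ : ∃ m, fa = m + 1 := ⟨fa - 1, by omega⟩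
    obtain ⟨fb', rfl⟩ : ∃ m, fb = m + 1 := ⟨fb - 1, by omega⟩
    have hi : ¬ i < cs.length := by omega
    refine ⟨fun q => by simp only [findA, findB, if_neg hi], fun q _ => ?_⟩
    rw [tokenEnd_out cs i q hi]
    simp only [findA, findB, if_neg hi]
  | succ k ih =>
    intro i fa fb hk hfa hfb
    obtain ⟨fa', rfl⟩ : ∃ m, fa = m + 1 := ⟨fa - 1, by omega⟩
    obtain ⟨fb', rfl⟩ : ∃ m, fb = m + 1 := ⟨fb - 1, by omega⟩
    by_cases hi : i < cs.length
    · constructor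
      · intro q
        simp only [findA, findB, if_pos hi, Bool.false_eq_true, if_false]
        by_cases hq : cs[i]! = '"' ∨ cs[i]! = '\''
        · simp only [if_pos hq]
          exact (ih (i + 1) fa' fb' (by omega) (by omega) (by omega)).2 cs[i]! hq
        · simp only [if_neg hq]
          by_cases hc : cs[i]! = '/' ∧ i + 1 < cs.length ∧ cs[i + 1]! = '/'
          · simp only [if_pos hc]
          · simp only [if_neg hc]
            exact (ih (i + 1) fa' fb' (by omega) (by omega) (by omega)).1 q
      · intro q hq
        have hqb : q ≠ '\\' := by rcases hq with h | h <;> simp [h]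
        simp only [findA, if_pos hi, if_true]
        by_cases hb : cs[i]! = '\\'
        · simp only [if_pos hb]
          by_cases h2 : i + 1 < cs.length
          · rw [tokenEnd_backslash cs i q hi hb h2]
            exact (ih (i + 2) fa' (fb' + 1) (by omega) (by omega) (by omega)).2 q hq
          · -- lone trailing backslash: A skips past the end (-1); B's token stops
            -- before the backslash, finditer finds nothing after it (-1)
            rw [tokenEnd_backslash_last cs i q hi hb h2 hqb]
            obtain ⟨fa'', rfl⟩ : ∃ m, fa' = m + 1 := ⟨fa' - 1, by omega⟩
            obtain ⟨fb'', rfl⟩ : ∃ m, fb' = m + 1 := ⟨fb' - 1, by omega⟩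
            have h2' : ¬ i + 2 < cs.length := by omega
            have hq1 : ¬ (cs[i]! = '"' ∨ cs[i]! = '\'') := by rw [hb]; decide
            have hq2 : ¬ (cs[i]! = '/' ∧ i + 1 < cs.length ∧ cs[i + 1]! = '/') := by
              rw [hb]; intro h; exact absurd h.1 (by decide)
            simp only [findA, findB, if_neg h2', if_pos hi, if_neg hq1, if_neg hq2,
              if_neg (show ¬ i + 1 < cs.length from h2)]
        · simp only [if_neg hb]
          by_cases he : cs[i]! = q
          · have he' : some cs[i]! = some q := by rw [he]
            rw [tokenEnd_close cs i q hi he hqb]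
            simp only [if_pos he']
            exact (ih (i + 1) fa' (fb' + 1) (by omega) (by omega) (by omega)).1 (some q)
          · have he' : ¬ some cs[i]! = some q := by simpa using he
            rw [tokenEnd_step cs i q hi hb he]
            simp only [if_neg he']
            exact (ih (i + 1) fa' (fb' + 1) (by omega) (by omega) (by omega)).2 q hq
    · refine ⟨fun q => by simp only [findA, findB, if_neg hi], fun q _ => ?_⟩
      rw [tokenEnd_out cs i q hi]
      simp only [findA, findB, if_neg hi]

-- ===== VERDICT (by name: the statement is the Claim_ definition above) =====
theorem find_line_comment_py_spec : Claim_equal_find_line_comment_py := by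
  intro line _
  unfold Spec_find_line_comment_py find_line_comment_py find_line_comment_py_alt
  exact (findA_eq_findB line.toList line.toList.length 0 (line.toList.length + 1)
    (line.toList.length + 1) (by omega) (by omega) (by omega)).1 none
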